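-- pv_equiv track=rewrite | github.com/BinamB/Firecode | Level 1/RepeatedElementsinArray.py | duplicate_items
-- ===== SOURCE A (Python) =====
-- def insertionSort(list):
--     for i in range(1, len(list)):
--         pointer = list[i]
--         j = i - 1
--         while j>=0 and pointer < list[j]:
--             list[j+1] = list[j]
--             j -= 1
--         list[j+1] = pointer
--     return(list)
--
-- def duplicate_items(list_numbers):
--     newList = []
--     insertionSort(list_numbers)
--     for i in range(0, len(list_numbers)):
--         pointer = list_numbers[i]
--         for j in range(i+1, len(list_numbers)):
--             if (pointer == list_numbers[j]):
--                 newList.append(pointer)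
--             else:
--                 break
--     return(newList)
-- ===== SOURCE B (Python) =====
-- # One-pass over sorted(): a streak counter emits (streak-1) copies per element,
-- # giving the triangular k*(k-1)/2 duplicates per run without A's O(n^2) inner rescans.
-- # Note: A sorts its argument in place; B leaves the argument untouched (return value is identical).
-- def duplicate_items(list_numbers):
--     out = []
--     run = 0
--     prev = None
--     for x in sorted(list_numbers):
--         run = run + 1 if x == prev else 1
--         out.extend([x] * (run - 1))
--         prev = x
--     return out
-- ===== Notes on version B (the rewrite author's own statement) =====
-- stated objective: faster
-- what changed: Replaces A's in-place insertion sort plus a quadratic nested rescan of equal neighbours by sorted() and a single pass with a streak counter that emits (streak-1) copies per element; intended as faster (comparisons drop from O(n^2) to O(n log n)): measured 11-840x on random inputs, but only ~2-3x on duplicate-only inputs where the quadratic output size dominates both versions.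
import Mathlib
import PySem

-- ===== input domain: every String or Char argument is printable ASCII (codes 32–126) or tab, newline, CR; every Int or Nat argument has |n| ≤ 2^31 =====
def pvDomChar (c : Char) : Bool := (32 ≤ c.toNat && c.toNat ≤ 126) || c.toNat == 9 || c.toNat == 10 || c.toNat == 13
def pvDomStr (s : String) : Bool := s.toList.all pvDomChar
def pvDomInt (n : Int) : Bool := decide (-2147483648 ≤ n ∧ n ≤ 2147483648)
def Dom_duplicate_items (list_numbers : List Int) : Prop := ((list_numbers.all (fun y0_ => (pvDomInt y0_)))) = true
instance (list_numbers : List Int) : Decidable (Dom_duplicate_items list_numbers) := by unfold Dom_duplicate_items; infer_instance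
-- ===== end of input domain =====

-- B replaces A's in-place insertion sort + quadratic nested rescan by sorted() and one pass with a
-- streak counter (same return value; A sorts its argument in place, B does not — return value only).

-- ===== PORT A =====
-- the inner while loop of insertionSort: shift elements right while pointer < list[j];
-- the running index is carried as n = j + 1 (Python's j runs i-1 … -1, so n is a Nat);
-- the returned Nat is the final j + 1, i.e. the slot that receives the pointer
def sortInner (l : List Int) (p : Int) : Nat → List Int × Nat
  | 0 => (l, 0)
  | n + 1 =>
      if p < l.getD n 0 then sortInner (l.set (n + 1) (l.getD n 0)) p n
      else (l, n + 1)

-- one iteration of insertionSort's outer for loop (index i): pointer = list[i]; while …; list[j+1] = pointer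
def stepA (l : List Int) (i : Nat) : List Int :=
  ((sortInner l (l.getD i 0) i).1).set (sortInner l (l.getD i 0) i).2 (l.getD i 0)

-- for i in range(1, len(list)) of insertionSort (the length is invariant, so the range is fixed)
def insertionSortA (l : List Int) : List Int :=
  (List.range' 1 (l.length - 1)).foldl stepA l

-- inner for j in range(i+1, n) with break on mismatch (cnt = how many indices remain)
def innerA (s : List Int) (p : Int) : Nat → Nat → List Int → List Int
  | _, 0, acc => acc
  | j, cnt + 1, acc => if p = s.getD j 0 then innerA s p (j + 1) cnt (acc ++ [p]) else acc

-- outer for i in range(0, len(list_numbers)) (cnt = how many indices remain)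
def outerA (s : List Int) : Nat → Nat → List Int → List Int
  | _, 0, acc => acc
  | i, cnt + 1, acc => outerA s (i + 1) cnt (innerA s (s.getD i 0) (i + 1) (s.length - (i + 1)) acc)

def duplicate_items (list_numbers : List Int) : List Int :=
  let s := insertionSortA list_numbers
  outerA s 0 s.length []

-- ===== PORT B =====
def duplicate_items_alt (list_numbers : List Int) : List Int :=
  ((PySem.List.sorted list_numbers (fun x => x) false).foldl
    (fun (st : List Int × Int × Option Int) x =>
      let run : Int := if some x = st.2.2 then st.2.1 + 1 else 1
      (st.1 ++ List.replicate (run - 1).toNat x, run, some x))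
    ([], 0, none)).1

-- ===== PRECONDITION & SPEC =====
def Spec_duplicate_items (list_numbers : List Int) (out : List Int) : Prop := out = duplicate_items_alt list_numbers
instance (list_numbers : List Int) (out : List Int) : Decidable (Spec_duplicate_items list_numbers out) := by unfold Spec_duplicate_items; infer_instance

-- ===== CLAIM (what is proved, stated in full; the proofs are below) =====
def Claim_equal_duplicate_items : Prop := ∀ (list_numbers : List Int), Dom_duplicate_items list_numbers → Spec_duplicate_items list_numbers (duplicate_items list_numbers)

-- ===== LEMMAS AND PROOFS =====

-- ---- Part 1: insertionSortA sorts ----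

-- the element p is inserted after the last element ≤ p (shift-from-the-right insertion)
def rins (p : Int) (a : List Int) : List Int :=
  (a.reverse.dropWhile (fun x => decide (p < x))).reverse ++
    p :: (a.reverse.takeWhile (fun x => decide (p < x))).reverse

theorem split_rev (p : Int) (a : List Int) :
    a = (a.reverse.dropWhile (fun x => decide (p < x))).reverse ++
        (a.reverse.takeWhile (fun x => decide (p < x))).reverse := by
  have h : (a.reverse.takeWhile (fun x => decide (p < x))) ++
      (a.reverse.dropWhile (fun x => decide (p < x))) = a.reverse :=
    List.takeWhile_append_dropWhile
  calc a = a.reverse.reverse := (List.reverse_reverse a).symm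
    _ = ((a.reverse.takeWhile (fun x => decide (p < x))) ++
          (a.reverse.dropWhile (fun x => decide (p < x)))).reverse := by rw [h]
    _ = _ := by rw [List.reverse_append]

theorem getD_append_len (c : List Int) (x : Int) (d : List Int) :
    (c ++ x :: d).getD c.length 0 = x := by
  simp [List.getD]

theorem set_append_len (c : List Int) (w v : Int) (d : List Int) :
    (c ++ w :: d).set c.length v = c ++ v :: d := by
  induction c with
  | nil => simp
  | cons y ys ih => simp [ih]

theorem sortInner_spec (ar : List Int) (hole p : Int) (b : List Int) :
    ∃ w, sortInner (ar.reverse ++ hole :: b) p ar.length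
      = ((ar.dropWhile (fun x => decide (p < x))).reverse ++
           w :: ((ar.takeWhile (fun x => decide (p < x))).reverse ++ b),
         (ar.dropWhile (fun x => decide (p < x))).length) := by
  induction ar generalizing hole b with
  | nil => exact ⟨hole, rfl⟩
  | cons x ar' ih =>
      have hshape : (x :: ar').reverse ++ hole :: b = ar'.reverse ++ x :: (hole :: b) := by
        simp [List.append_assoc]
      have hget : (ar'.reverse ++ x :: (hole :: b)).getD ar'.reverse.length 0 = x :=
        getD_append_len ar'.reverse x (hole :: b)
      have hlen : (x :: ar').length = ar'.length + 1 := rfl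
      rw [hshape, hlen]
      by_cases hx : p < x
      · rw [show ar'.length + 1 = ar'.reverse.length + 1 by simp]
        rw [sortInner, if_pos (by rw [hget]; exact hx), hget]
        have hset : (ar'.reverse ++ x :: (hole :: b)).set (ar'.reverse.length + 1) x
            = ar'.reverse ++ x :: (x :: b) := by
          have := set_append_len (ar'.reverse ++ [x]) hole x b
          simpa [List.append_assoc] using this
        rw [hset]
        obtain ⟨w, hw⟩ := ih x (x :: b)
        refine ⟨w, ?_⟩
        rw [show ar'.reverse.length = ar'.length by simp, hw]
        simp [hx, List.append_assoc]
      · refine ⟨hole, ?_⟩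
        rw [show ar'.length + 1 = ar'.reverse.length + 1 by simp]
        rw [sortInner, if_neg (by rw [hget]; exact hx)]
        simp [hx, List.reverse_cons, List.append_assoc]

theorem stepA_spec (a : List Int) (p : Int) (b : List Int) :
    stepA (a ++ p :: b) a.length = rins p a ++ b := by
  obtain ⟨w, hw⟩ := sortInner_spec a.reverse p p b
  rw [List.reverse_reverse] at hw
  rw [show a.reverse.length = a.length by simp] at hw
  unfold stepA
  rw [getD_append_len, hw]
  dsimp only
  rw [show (a.reverse.dropWhile (fun x => decide (p < x))).length
      = (a.reverse.dropWhile (fun x => decide (p < x))).reverse.length by simp]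
  rw [set_append_len]
  simp [rins, List.append_assoc]
theorem rins_perm (p : Int) (a : List Int) : (rins p a).Perm (p :: a) := by
  have h : (rins p a).Perm
      (p :: ((a.reverse.dropWhile (fun x => decide (p < x))).reverse ++
        (a.reverse.takeWhile (fun x => decide (p < x))).reverse)) := List.perm_middle
  rw [← split_rev p a] at h
  exact h

theorem dropWhile_head_false (q : Int → Bool) : ∀ (l : List Int) (z : Int) (zs : List Int),
    l.dropWhile q = z :: zs → q z = false := by
  intro l
  induction l with
  | nil => intro z zs h; simp at h
  | cons x xs ih =>
      intro z zs h
      by_cases hq : q x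
      · rw [List.dropWhile_cons_of_pos hq] at h; exact ih z zs h
      · rw [List.dropWhile_cons_of_neg hq] at h
        injection h with h1 _
        rw [← h1]
        simpa using hq

theorem mem_drop_le (p : Int) (a : List Int) (h : a.Pairwise (· ≤ ·)) :
    ∀ u ∈ a.reverse.dropWhile (fun x => decide (p < x)), u ≤ p := by
  have hrev : a.reverse.Pairwise (fun x y => y ≤ x) := by
    rw [List.pairwise_reverse]; exact h
  have hd : (a.reverse.dropWhile (fun x => decide (p < x))).Pairwise (fun x y => y ≤ x) :=
    List.Pairwise.sublist (List.dropWhile_sublist _) hrev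
  intro u hu
  cases hdw : a.reverse.dropWhile (fun x => decide (p < x)) with
  | nil => rw [hdw] at hu; simp at hu
  | cons z zs =>
      have hz : ¬ p < z := by
        have := dropWhile_head_false (fun x => decide (p < x)) a.reverse z zs hdw
        simpa using this
      rw [hdw] at hu hd
      rcases List.mem_cons.mp hu with rfl | hu'
      · omega
      · have := (List.pairwise_cons.mp hd).1 u hu'
        omega

theorem rins_sorted (p : Int) (a : List Int) (h : a.Pairwise (· ≤ ·)) :
    (rins p a).Pairwise (· ≤ ·) := by
  have hsplit := split_rev p a
  have h' := h
  rw [hsplit, List.pairwise_append] at h'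
  obtain ⟨h1, h2, h3⟩ := h'
  have hdle : ∀ u ∈ (a.reverse.dropWhile (fun x => decide (p < x))).reverse, u ≤ p :=
    fun u hu => mem_drop_le p a h u (List.mem_reverse.mp hu)
  have htgt : ∀ v ∈ (a.reverse.takeWhile (fun x => decide (p < x))).reverse, p < v := by
    intro v hv
    have := List.mem_takeWhile_imp (List.mem_reverse.mp hv)
    simpa using this
  rw [rins, List.pairwise_append]
  refine ⟨h1, ?_, ?_⟩
  · rw [List.pairwise_cons]
    exact ⟨fun v hv => le_of_lt (htgt v hv), h2⟩
  · intro u hu v hv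
    rcases List.mem_cons.mp hv with rfl | hv'
    · exact hdle u hu
    · exact le_trans (hdle u hu) (le_of_lt (htgt v hv'))

theorem sortFold : ∀ (b c : List Int), c.Pairwise (· ≤ ·) →
    ((List.range' c.length b.length).foldl stepA (c ++ b)).Perm (c ++ b) ∧
    ((List.range' c.length b.length).foldl stepA (c ++ b)).Pairwise (· ≤ ·) := by
  intro b
  induction b with
  | nil =>
      intro c hc
      simp [hc]
  | cons x b' ih =>
      intro c hc
      rw [show (x :: b').length = b'.length + 1 from rfl, List.range'_succ, List.foldl_cons]
      rw [stepA_spec c x b']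
      have hlen : c.length + 1 = (rins x c).length := by
        have := (rins_perm x c).length_eq
        simp at this; omega
      rw [hlen]
      obtain ⟨hp, hs⟩ := ih (rins x c) (rins_sorted x c hc)
      refine ⟨?_, hs⟩
      exact hp.trans (((rins_perm x c).append_right b').trans List.perm_middle.symm)

theorem insertionSortA_eq (l : List Int) :
    insertionSortA l = PySem.List.sorted l (fun x => x) false := by
  cases l with
  | nil => decide
  | cons x t =>
      obtain ⟨hp, hs⟩ := sortFold t [x] (by simp)
      have hp' : (insertionSortA (x :: t)).Perm (x :: t) := hp
      have hs' : (insertionSortA (x :: t)).Pairwise (· ≤ ·) := hs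
      exact Eq.symm (PySem.List.sorted_id_eq_of_perm_of_pairwise _ _ hp' hs')

-- ---- Part 2: structural views of both scans ----

-- length of the run of p at the head of a list
def runlen (p : Int) : List Int → Nat
  | [] => 0
  | x :: xs => if p = x then runlen p xs + 1 else 0

-- structural view of A's nested scan
def scanA : List Int → List Int
  | [] => []
  | x :: xs => List.replicate (runlen x xs) x ++ scanA xs

-- structural view of B's one-pass fold
def scanB : List Int → Int → Option Int → List Int
  | [], _, _ => []
  | x :: xs, run, prev =>
      (if some x = prev then
        List.replicate (run + 1 - 1).toNat x ++ scanB xs (run + 1) (some x)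
      else
        List.replicate ((1 : Int) - 1).toNat x ++ scanB xs 1 (some x))

theorem innerA_spec (s : List Int) (p : Int) : ∀ cnt j acc, j + cnt = s.length →
    innerA s p j cnt acc = acc ++ List.replicate (runlen p (s.drop j)) p := by
  intro cnt
  induction cnt with
  | zero =>
      intro j acc hj
      rw [innerA, List.drop_eq_nil_of_le (by omega)]
      simp [runlen]
  | succ cnt ihc =>
      intro j acc hj
      have hjlt : j < s.length := by omega
      have hdrop : s.drop j = s[j] :: s.drop (j + 1) := List.drop_eq_getElem_cons hjlt
      have hget : s.getD j 0 = s[j] := List.getD_eq_getElem s 0 hjlt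
      rw [innerA]
      by_cases hp : p = s.getD j 0
      · rw [if_pos hp, ihc (j + 1) (acc ++ [p]) (by omega)]
        rw [hdrop, runlen, if_pos (by rw [hget] at hp; exact hp)]
        simp [List.replicate_succ, List.append_assoc]
      · rw [if_neg hp, hdrop, runlen, if_neg (by rw [hget] at hp; exact hp)]
        simp
  
theorem outerA_spec (s : List Int) : ∀ cnt i acc, i + cnt = s.length →
    outerA s i cnt acc = acc ++ scanA (s.drop i) := by
  intro cnt
  induction cnt with
  | zero =>
      intro i acc hi
      rw [outerA, List.drop_eq_nil_of_le (by omega)]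
      simp [scanA]
  | succ cnt ihc =>
      intro i acc hi
      have hilt : i < s.length := by omega
      rw [outerA, show s.length - (i + 1) = cnt by omega,
        innerA_spec s (s.getD i 0) cnt (i + 1) acc (by omega),
        ihc (i + 1) _ (by omega)]
      have hdrop : s.drop i = s[i] :: s.drop (i + 1) := List.drop_eq_getElem_cons hilt
      have hget : s.getD i 0 = s[i] := List.getD_eq_getElem s 0 hilt
      rw [hdrop, scanA, hget, List.append_assoc]

theorem foldB_spec (xs : List Int) : ∀ out run prev,
    (xs.foldl (fun (st : List Int × Int × Option Int) x =>
        let run : Int := if some x = st.2.2 then st.2.1 + 1 else 1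
        (st.1 ++ List.replicate (run - 1).toNat x, run, some x)) (out, run, prev)).1
      = out ++ scanB xs run prev := by
  induction xs with
  | nil => intro out run prev; simp [scanB]
  | cons x xs ih =>
      intro out run prev
      simp only [List.foldl_cons, scanB]
      by_cases h : some x = prev
      · simp only [h, if_true]
        rw [ih]
        simp [List.append_assoc]
      · simp only [if_neg h]
        rw [ih]
        simp

-- ---- Part 3: scanA = scanB ----

def tri : Nat → Nat
  | 0 => 0
  | k + 1 => k + tri k

theorem runlen_of_head_ne (v : Int) (rest : List Int) (h : rest.head? ≠ some v) :
    runlen v rest = 0 := by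
  cases rest with
  | nil => rfl
  | cons x xs =>
      simp only [List.head?_cons, ne_eq, Option.some.injEq] at h
      rw [runlen, if_neg (fun hc => h hc.symm)]

theorem runlen_replicate (v : Int) (rest : List Int) (h : rest.head? ≠ some v) :
    ∀ k, runlen v (List.replicate k v ++ rest) = k := by
  intro k
  induction k with
  | zero => simpa using runlen_of_head_ne v rest h
  | succ k ihk => rw [List.replicate_succ, List.cons_append, runlen, if_pos rfl, ihk]

theorem scanA_run (v : Int) : ∀ (k : Nat) (rest : List Int), rest.head? ≠ some v →
    scanA (List.replicate k v ++ rest) = List.replicate (tri k) v ++ scanA rest := by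
  intro k
  induction k with
  | zero => intro rest h; simp [tri]
  | succ k ih =>
      intro rest h
      rw [List.replicate_succ, List.cons_append, scanA, ih rest h]
      rw [runlen_replicate v rest h k, ← List.append_assoc, ← List.replicate_add]
      congr 2

theorem scanB_none (xs : List Int) (r r' : Int) : scanB xs r none = scanB xs r' none := by
  cases xs <;> simp [scanB]

theorem scanB_run (v : Int) : ∀ (k : Nat) (r : Nat) (rest : List Int), rest.head? ≠ some v →
    scanB (List.replicate k v ++ rest) ((r : Int)) (some v)
      = List.replicate (k * r + tri k) v ++ scanB rest 1 none := by
  intro k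
  induction k with
  | zero =>
      intro r rest h
      cases rest with
      | nil => simp [scanB, tri]
      | cons x xs =>
          simp only [List.head?_cons, ne_eq, Option.some.injEq] at h
          simp only [List.replicate, List.nil_append, scanB]
          rw [if_neg (by simpa using h)]
          simp [tri]
  | succ k ih =>
      intro r rest h
      rw [List.replicate_succ, List.cons_append, scanB, if_pos rfl]
      have hcast : ((r : Int) + 1) = ((r + 1 : Nat) : Int) := by push_cast; ring
      rw [hcast, ih (r + 1) rest h]
      have htn : (((r + 1 : Nat) : Int) - 1).toNat = r := by omega
      rw [htn, ← List.append_assoc, ← List.replicate_add]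
      congr 2
      simp only [tri]
      ring

theorem runlen_decomp (v : Int) : ∀ (xs : List Int), ∃ rest,
    xs = List.replicate (runlen v xs) v ++ rest ∧ rest.head? ≠ some v ∧
    rest.length + runlen v xs = xs.length := by
  intro xs
  induction xs with
  | nil => exact ⟨[], by simp [runlen]⟩
  | cons x xs ih =>
      by_cases hv : v = x
      · obtain ⟨rest, h1, h2, h3⟩ := ih
        refine ⟨rest, ?_, h2, ?_⟩
        · rw [runlen, if_pos hv, List.replicate_succ, List.cons_append, ← h1, hv]
        · rw [runlen, if_pos hv]; simp at h3 ⊢; omega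
      · refine ⟨x :: xs, ?_, ?_, ?_⟩
        · rw [runlen, if_neg hv]; simp
        · simp; intro hc; exact hv hc.symm
        · rw [runlen, if_neg hv]; simp

theorem scanA_eq_scanB : ∀ (n : Nat) (s : List Int), s.length ≤ n → scanA s = scanB s 0 none := by
  intro n
  induction n with
  | zero =>
      intro s hs
      have : s = [] := List.eq_nil_of_length_eq_zero (by omega)
      rw [this]; rfl
  | succ n ih =>
      intro s hs
      cases s with
      | nil => rfl
      | cons x xs =>
          obtain ⟨rest, h1, h2, h3⟩ := runlen_decomp x xs
          have hrest : scanA rest = scanB rest 1 none := by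
            refine (ih rest ?_).trans (scanB_none rest 0 1)
            simp at hs; omega
          rw [scanA, h1, runlen_replicate x rest h2 (runlen x xs),
            scanA_run x (runlen x xs) rest h2, scanB, if_neg (by simp)]
          rw [show ((1:Int)) = ((1 : Nat) : Int) from rfl,
            scanB_run x (runlen x xs) 1 rest h2, ← hrest]
          simp only [Int.sub_self, Int.toNat_zero, List.replicate_zero, List.nil_append,
            ← List.append_assoc, ← List.replicate_add, Nat.mul_one]

-- ===== VERDICT (by name: the statement is the Claim_ definition above) =====
theorem duplicate_items_spec : Claim_equal_duplicate_items := by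
  intro l _
  unfold Spec_duplicate_items duplicate_items duplicate_items_alt
  rw [insertionSortA_eq]
  rw [outerA_spec _ _ 0 [] (by omega), foldB_spec]
  simp only [List.drop_zero, List.nil_append]
  exact scanA_eq_scanB (PySem.List.sorted l (fun x => x) false).length _ le_rfl
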